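-- pv_equiv track=rewrite | github.com/Mooling0602/MoreGameEvents-MCDR | mg_events/parser/death.py | generate_pattern
-- ===== SOURCE A (Python) =====
-- def generate_pattern(format_string) -> str:
--     # pattern = re.escape(format_string)
--     # 替换 %1$s、%2$s 和 %3$s 为对应的捕获组
--     replacements = {
--         r"%1$s": r"(?P<player>.\w+|\w+)",  # 匹配玩家名
--         r"%2$s": r"(?P<killer>.+)",  # 匹配杀手名
--         r"%3$s": r"(?P<weapon>\[[^\]]+\])"  # 匹配武器
--     }
--     for placeholder, regex in replacements.items():
--         format_string = format_string.replace(placeholder, regex)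
--     return f"^{format_string}$"
-- ===== SOURCE B (Python) =====
-- def generate_pattern(format_string) -> str:
--     # single left-to-right scan: at each position look at the 4-char window and
--     # dispatch via dict lookup, instead of three sequential full-string replace passes
--     replacements = {
--         r"%1$s": r"(?P<player>.\w+|\w+)",
--         r"%2$s": r"(?P<killer>.+)",
--         r"%3$s": r"(?P<weapon>\[[^\]]+\])",
--     }
--     out = []
--     i = 0
--     n = len(format_string)
--     while i < n:
--         chunk = format_string[i:i + 4]
--         if chunk in replacements:
--             out.append(replacements[chunk])
--             i += 4
--         else:
--             out.append(format_string[i])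
--             i += 1
--     return "^" + "".join(out) + "$"
-- ===== Notes on version B (the rewrite author's own statement) =====
-- stated objective: alternative
-- what changed: Replaces A's three sequential full-string str.replace passes with a single left-to-right scan that inspects the 4-char window at each position and dispatches via one dict lookup.
import Mathlib
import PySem

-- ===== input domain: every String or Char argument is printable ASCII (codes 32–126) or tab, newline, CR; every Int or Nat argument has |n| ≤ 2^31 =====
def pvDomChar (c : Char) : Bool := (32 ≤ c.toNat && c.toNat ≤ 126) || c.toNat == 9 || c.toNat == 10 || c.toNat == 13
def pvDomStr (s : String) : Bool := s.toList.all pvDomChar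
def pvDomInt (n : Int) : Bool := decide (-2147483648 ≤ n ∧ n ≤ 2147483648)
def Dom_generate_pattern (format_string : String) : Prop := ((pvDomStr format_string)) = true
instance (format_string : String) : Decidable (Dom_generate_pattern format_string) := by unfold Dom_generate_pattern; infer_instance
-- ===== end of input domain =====

-- B replaces A's three sequential full-string str.replace passes by a single left-to-right
-- scan dispatching on the 4-char window via a dict lookup (objective: alternative; not timed faster).

-- ===== PORT A =====
def generate_pattern (format_string : String) : String :=
  -- the dict literal, as an association list in insertion order
  let replacements : List (String × String) :=
    [("%1$s", "(?P<player>.\\w+|\\w+)"),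
     ("%2$s", "(?P<killer>.+)"),
     ("%3$s", "(?P<weapon>\\[[^\\]]+\\])")]
  -- 'for placeholder, regex in replacements.items(): format_string = format_string.replace(…)'
  let fs := replacements.foldl (fun s pr => PySem.Str.replace s pr.1 pr.2) format_string
  "^" ++ fs ++ "$"

-- ===== PORT B =====
def pvK1 : List Char := "%1$s".toList
def pvK2 : List Char := "%2$s".toList
def pvK3 : List Char := "%3$s".toList
def pvR1 : List Char := "(?P<player>.\\w+|\\w+)".toList
def pvR2 : List Char := "(?P<killer>.+)".toList
def pvR3 : List Char := "(?P<weapon>\\[[^\\]]+\\])".toList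

-- the while loop of Source B: at each position take the 4-char window (format_string[i:i+4]),
-- test it against the dict keys in insertion order, emit the replacement or the single char
def scanB : List Char → List Char
  | [] => []
  | c :: t =>
    if (c :: t).take 4 = pvK1 then pvR1 ++ scanB (t.drop 3)
    else if (c :: t).take 4 = pvK2 then pvR2 ++ scanB (t.drop 3)
    else if (c :: t).take 4 = pvK3 then pvR3 ++ scanB (t.drop 3)
    else c :: scanB t
termination_by l => l.length
decreasing_by
  all_goals (simp [List.length_drop]; try omega)

def generate_pattern_alt (format_string : String) : String :=
  "^" ++ String.ofList (scanB format_string.toList) ++ "$"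

-- ===== PRECONDITION & SPEC =====
def Spec_generate_pattern (format_string : String) (out : String) : Prop := out = generate_pattern_alt format_string
instance (format_string : String) (out : String) : Decidable (Spec_generate_pattern format_string out) := by unfold Spec_generate_pattern; infer_instance

-- ===== CLAIM (what is proved, stated in full; the proofs are below) =====
def Claim_equal_generate_pattern : Prop := ∀ (format_string : String), Dom_generate_pattern format_string → Spec_generate_pattern format_string (generate_pattern format_string)

-- ===== LEMMAS AND PROOFS =====

-- structural form of PySem.Chars.replace for a nonempty needle
def rep4 (k r : List Char) : List Char → List Char
  | [] => []
  | c :: t =>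
    if k.isPrefixOf (c :: t) then r ++ rep4 k r (t.drop (k.length - 1))
    else c :: rep4 k r t
termination_by l => l.length
decreasing_by
  all_goals (simp [List.length_drop]; try omega)

lemma go_eq (k r : List Char) (hk : k ≠ []) :
    ∀ (fuel : Nat) (l acc : List Char), l.length ≤ fuel →
      PySem.Chars.replace.go k r fuel l acc = acc.reverse ++ rep4 k r l := by
  intro fuel
  induction fuel with
  | zero =>
    intro l acc h
    have : l = [] := by cases l <;> simp_all
    subst this
    simp [PySem.Chars.replace.go, rep4]
  | succ n ih =>
    intro l acc h
    match l with
    | [] => simp [PySem.Chars.replace.go, rep4]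
    | c :: t =>
      rw [PySem.Chars.replace.go]
      by_cases hp : k.isPrefixOf (c :: t)
      · simp only [hp, if_true]
        have hd : List.drop k.length (c :: t) = t.drop (k.length - 1) := by
          cases k with
          | nil => exact absurd rfl hk
          | cons a b => simp
        rw [hd, ih _ _ (show (t.drop (k.length - 1)).length ≤ n by simp at h ⊢; omega)]
        rw [rep4]
        simp [hp]
      · simp only [hp]
        rw [ih _ _ (show t.length ≤ n by simp at h; omega)]
        rw [rep4]
        simp [hp]

lemma replace_eq_rep4 (s k r : List Char) (hk : k ≠ []) :
    PySem.Chars.replace s k r = rep4 k r s := by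
  rw [PySem.Chars.replace]
  simp [List.isEmpty_iff, hk, go_eq k r hk s.length s [] (le_refl _)]

-- skipping a block that the needle's first char does not occur in
lemma rep4_append (k r : List Char) (hc : Char) (hk : k.head? = some hc) :
    ∀ (u v : List Char), hc ∉ u → rep4 k r (u ++ v) = u ++ rep4 k r v := by
  intro u
  induction u with
  | nil => intro v _; rfl
  | cons a u' ih =>
    intro v hu
    have hane : hc ≠ a := by simp at hu; tauto
    have hnp : ¬ k.isPrefixOf (a :: (u' ++ v)) := by
      cases k with
      | nil => simp at hk
      | cons b k' =>
        simp at hk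
        intro hpre
        simp [List.isPrefixOf] at hpre
        exact hane (hk ▸ hpre.1)
    rw [List.cons_append, rep4]
    simp only [hnp, Bool.false_eq_true, if_false]
    rw [ih v (by simp at hu; tauto)]
    simp

-- a '('-free prefix of rep4's output is a prefix of the input (replacements start with '(')
lemma rep4_prefix_reflect (k r : List Char) (hr : r.head? = some '(') :
    ∀ (v p : List Char), '(' ∉ p → p <+: rep4 k r v → p <+: v := by
  intro v
  induction v with
  | nil => intro p _ h; simpa [rep4] using h
  | cons c t ih =>
    intro p hp h
    rw [rep4] at h
    by_cases hpre : k.isPrefixOf (c :: t)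
    · simp only [hpre, if_true] at h
      cases r with
      | nil => simp at hr
      | cons rc r' =>
        simp at hr
        subst hr
        cases p with
        | nil => exact List.nil_prefix
        | cons a p' =>
          rw [List.cons_append, List.cons_prefix_cons] at h
          exact absurd (h.1 ▸ List.mem_cons_self) hp
    · simp only [hpre, Bool.false_eq_true, if_false] at h
      cases p with
      | nil => exact List.nil_prefix
      | cons a p' =>
        rw [List.cons_prefix_cons] at h ⊢
        refine ⟨h.1, ih p' (by simp at hp; tauto) h.2⟩

lemma take4_eq_iff (l k : List Char) (hk : k.length = 4) : l.take 4 = k ↔ k <+: l := by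
  rw [List.prefix_iff_eq_take, hk]
  exact eq_comm

lemma pvK1_eq : pvK1 = ['%','1','$','s'] := by decide
lemma pvK2_eq : pvK2 = ['%','2','$','s'] := by decide
lemma pvK3_eq : pvK3 = ['%','3','$','s'] := by decide

lemma rep4_pos (k r c t) (h : k <+: (c :: t)) :
    rep4 k r (c :: t) = r ++ rep4 k r (t.drop (k.length - 1)) := by
  rw [rep4, if_pos (List.isPrefixOf_iff_prefix.mpr h)]

lemma rep4_neg (k r c t) (h : ¬ k <+: (c :: t)) :
    rep4 k r (c :: t) = c :: rep4 k r t := by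
  rw [rep4, if_neg]
  simpa [List.isPrefixOf_iff_prefix] using h

lemma main_eq : ∀ (n : Nat) (v : List Char), v.length ≤ n →
    rep4 pvK3 pvR3 (rep4 pvK2 pvR2 (rep4 pvK1 pvR1 v)) = scanB v := by
  intro n
  induction n with
  | zero =>
    intro v hv
    have : v = [] := by cases v <;> simp_all
    subst this
    simp [rep4, scanB]
  | succ n ih =>
    intro v hv
    by_cases h1 : pvK1 <+: v
    · obtain ⟨u, rfl⟩ := h1
      have hu : u.length ≤ n := by simp [pvK1_eq] at hv; omega
      rw [show pvK1 ++ u = '%' :: ('1'::'$'::'s'::u) from rfl]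
      rw [rep4_pos _ _ _ _ (show pvK1 <+: '%' :: ('1'::'$'::'s'::u) from ⟨u, rfl⟩)]
      rw [show List.drop (pvK1.length - 1) ('1'::'$'::'s'::u) = u from rfl]
      rw [rep4_append pvK2 pvR2 '%' rfl pvR1 _ (by decide)]
      rw [rep4_append pvK3 pvR3 '%' rfl pvR1 _ (by decide)]
      rw [scanB]
      rw [if_pos (show ('%' :: ('1'::'$'::'s'::u)).take 4 = pvK1 from rfl)]
      rw [show List.drop 3 ('1'::'$'::'s'::u) = u from rfl, ih u hu]
    · by_cases h2 : pvK2 <+: v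
      · obtain ⟨u, rfl⟩ := h2
        have hu : u.length ≤ n := by simp [pvK2_eq] at hv; omega
        rw [show pvK2 ++ u = '%' :: ('2'::'$'::'s'::u) from rfl] at h1 ⊢
        rw [rep4_neg _ _ _ _ h1]
        rw [show ('2'::'$'::'s'::u : List Char) = ['2','$','s'] ++ u from rfl,
            rep4_append pvK1 pvR1 '%' rfl _ u (by decide)]
        rw [show ((['2','$','s'] : List Char) ++ rep4 pvK1 pvR1 u)
              = '2'::'$'::'s'::rep4 pvK1 pvR1 u from rfl]
        rw [rep4_pos pvK2 pvR2 '%' ('2'::'$'::'s'::rep4 pvK1 pvR1 u) ⟨rep4 pvK1 pvR1 u, rfl⟩]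
        rw [show List.drop (pvK2.length - 1) ('2'::'$'::'s'::rep4 pvK1 pvR1 u)
              = rep4 pvK1 pvR1 u from rfl]
        rw [rep4_append pvK3 pvR3 '%' rfl pvR2 _ (by decide)]
        rw [scanB]
        simp only [List.cons_append, List.nil_append]
        rw [if_neg (show ¬ ('%' :: ('2'::'$'::'s'::u)).take 4 = pvK1 by
              rw [show ('%' :: ('2'::'$'::'s'::u)).take 4 = pvK2 from rfl, pvK2_eq, pvK1_eq]
              decide)]
        rw [if_pos (show ('%' :: ('2'::'$'::'s'::u)).take 4 = pvK2 from rfl)]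
        rw [show List.drop 3 ('2'::'$'::'s'::u) = u from rfl, ih u hu]
      · by_cases h3 : pvK3 <+: v
        · obtain ⟨u, rfl⟩ := h3
          have hu : u.length ≤ n := by simp [pvK3_eq] at hv; omega
          rw [show pvK3 ++ u = '%' :: ('3'::'$'::'s'::u) from rfl] at h1 h2 ⊢
          rw [rep4_neg _ _ _ _ h1]
          rw [show ('3'::'$'::'s'::u : List Char) = ['3','$','s'] ++ u from rfl,
              rep4_append pvK1 pvR1 '%' rfl _ u (by decide)]
          rw [show ((['3','$','s'] : List Char) ++ rep4 pvK1 pvR1 u)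
                = '3'::'$'::'s'::rep4 pvK1 pvR1 u from rfl]
          rw [rep4_neg pvK2 pvR2 '%' ('3'::'$'::'s'::rep4 pvK1 pvR1 u)
                (by rw [pvK2_eq]; simp [List.cons_prefix_cons])]
          rw [show ('3'::'$'::'s'::rep4 pvK1 pvR1 u : List Char)
                = ['3','$','s'] ++ rep4 pvK1 pvR1 u from rfl,
              rep4_append pvK2 pvR2 '%' rfl _ _ (by decide)]
          rw [show ((['3','$','s'] : List Char) ++ rep4 pvK2 pvR2 (rep4 pvK1 pvR1 u))
                = '3'::'$'::'s'::rep4 pvK2 pvR2 (rep4 pvK1 pvR1 u) from rfl]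
          rw [rep4_pos pvK3 pvR3 '%' ('3'::'$'::'s'::rep4 pvK2 pvR2 (rep4 pvK1 pvR1 u))
                ⟨rep4 pvK2 pvR2 (rep4 pvK1 pvR1 u), rfl⟩]
          rw [show List.drop (pvK3.length - 1) ('3'::'$'::'s'::rep4 pvK2 pvR2 (rep4 pvK1 pvR1 u))
                = rep4 pvK2 pvR2 (rep4 pvK1 pvR1 u) from rfl]
          rw [scanB]
          simp only [List.cons_append, List.nil_append]
          rw [if_neg (show ¬ ('%' :: ('3'::'$'::'s'::u)).take 4 = pvK1 by
                rw [show ('%' :: ('3'::'$'::'s'::u)).take 4 = pvK3 from rfl, pvK3_eq, pvK1_eq]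
                decide)]
          rw [if_neg (show ¬ ('%' :: ('3'::'$'::'s'::u)).take 4 = pvK2 by
                rw [show ('%' :: ('3'::'$'::'s'::u)).take 4 = pvK3 from rfl, pvK3_eq, pvK2_eq]
                decide)]
          rw [if_pos (show ('%' :: ('3'::'$'::'s'::u)).take 4 = pvK3 from rfl)]
          rw [show List.drop 3 ('3'::'$'::'s'::u) = u from rfl, ih u hu]
        · match v with
          | [] => simp [rep4, scanB]
          | c :: t =>
            have ht : t.length ≤ n := by simp at hv; omega
            rw [rep4_neg _ _ _ _ h1]
            have hn2 : ¬ pvK2 <+: c :: rep4 pvK1 pvR1 t := by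
              intro hpre
              rw [pvK2_eq, List.cons_prefix_cons] at hpre
              have := rep4_prefix_reflect pvK1 pvR1 rfl t ['2','$','s'] (by decide) hpre.2
              exact h2 (by rw [pvK2_eq]; exact List.cons_prefix_cons.mpr ⟨hpre.1, this⟩)
            rw [rep4_neg _ _ _ _ hn2]
            have hn3 : ¬ pvK3 <+: c :: rep4 pvK2 pvR2 (rep4 pvK1 pvR1 t) := by
              intro hpre
              rw [pvK3_eq, List.cons_prefix_cons] at hpre
              have s2 := rep4_prefix_reflect pvK2 pvR2 rfl (rep4 pvK1 pvR1 t)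
                ['3','$','s'] (by decide) hpre.2
              have s1 := rep4_prefix_reflect pvK1 pvR1 rfl t ['3','$','s'] (by decide) s2
              exact h3 (by rw [pvK3_eq]; exact List.cons_prefix_cons.mpr ⟨hpre.1, s1⟩)
            rw [rep4_neg _ _ _ _ hn3]
            rw [scanB]
            rw [if_neg (by rw [take4_eq_iff _ _ (show pvK1.length = 4 from rfl)]; exact h1),
                if_neg (by rw [take4_eq_iff _ _ (show pvK2.length = 4 from rfl)]; exact h2),
                if_neg (by rw [take4_eq_iff _ _ (show pvK3.length = 4 from rfl)]; exact h3),
                ih t ht]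

-- ===== VERDICT (by name: the statement is the Claim_ definition above) =====
theorem generate_pattern_spec : Claim_equal_generate_pattern := by
  intro fs _
  unfold Spec_generate_pattern generate_pattern generate_pattern_alt
  simp only [List.foldl]
  rw [PySem.Str.replace, PySem.Str.replace, PySem.Str.replace]
  rw [String.toList_ofList, String.toList_ofList]
  rw [replace_eq_rep4 _ _ _ (by decide), replace_eq_rep4 _ _ _ (by decide),
      replace_eq_rep4 _ _ _ (by decide)]
  rw [show ("%1$s" : String).toList = pvK1 from rfl, show ("%2$s" : String).toList = pvK2 from rfl,
      show ("%3$s" : String).toList = pvK3 from rfl,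
      show ("(?P<player>.\\w+|\\w+)" : String).toList = pvR1 from rfl,
      show ("(?P<killer>.+)" : String).toList = pvR2 from rfl,
      show ("(?P<weapon>\\[[^\\]]+\\])" : String).toList = pvR3 from rfl]
  rw [main_eq fs.toList.length fs.toList (le_refl _)]
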